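-- pv_equiv track=rewrite | github.com/canvon/CLI-P | faces.py | reorient
-- ===== SOURCE A (Python) =====
-- def reorient(w, h, points, orientation):
--     if orientation is None or orientation == 1:
--         return points
--     if len(points) == 4:
--         a, b = reorient(w, h, (points[0], points[1]), orientation)
--         c, d = reorient(w, h, (points[2], points[3]), orientation)
--         return (min(a,c), min(b,d), max(a,c), max(b,d))
--     if orientation == 3:
--         # 180 degrees
--         return (w - points[0], h - points[1])
--     elif orientation == 6:
--         # 270 degrees
--         return (w - points[1], points[0])
--     elif orientation == 8:
--         # 90 degrees
--         return (points[1], h - points[0])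
--     return points
-- ===== SOURCE B (Python) =====
-- def _flags(orientation):
--     # decode the EXIF code into (swap axes, mirror x against w, mirror y against h)
--     swap = orientation in (6, 8)
--     negx = orientation in (3, 6)
--     negy = orientation in (3, 8)
--     return swap, negx, negy
--
-- def reorient(w, h, points, orientation):
--     if orientation is None or orientation == 1:
--         return points
--     swap, negx, negy = _flags(orientation)
--     if len(points) == 4:
--         # normalize each axis to an ordered interval, then map the intervals directly:
--         # a swap exchanges the axis intervals, a mirror reverses one interval.
--         xlo, xhi = (points[0], points[2]) if points[0] <= points[2] else (points[2], points[0])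
--         ylo, yhi = (points[1], points[3]) if points[1] <= points[3] else (points[3], points[1])
--         if swap:
--             xlo, xhi, ylo, yhi = ylo, yhi, xlo, xhi
--         if negx:
--             xlo, xhi = w - xhi, w - xlo
--         if negy:
--             ylo, yhi = h - yhi, h - ylo
--         return (xlo, ylo, xhi, yhi)
--     if swap or negx or negy:
--         x, y = points[0], points[1]
--         if swap:
--             x, y = y, x
--         if negx:
--             x = w - x
--         if negy:
--             y = h - y
--         return (x, y)
--     return points
-- ===== Notes on version B (the rewrite author's own statement) =====
-- stated objective: alternative
-- what changed: Replaced A's recursive corner-transform plus min/max normalization by a table decoding each orientation into (swap-axes, negate-x, negate-y) flags applied to pre-normalized per-axis intervals, so no transformed-corner min/max is computed.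
import Mathlib
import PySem

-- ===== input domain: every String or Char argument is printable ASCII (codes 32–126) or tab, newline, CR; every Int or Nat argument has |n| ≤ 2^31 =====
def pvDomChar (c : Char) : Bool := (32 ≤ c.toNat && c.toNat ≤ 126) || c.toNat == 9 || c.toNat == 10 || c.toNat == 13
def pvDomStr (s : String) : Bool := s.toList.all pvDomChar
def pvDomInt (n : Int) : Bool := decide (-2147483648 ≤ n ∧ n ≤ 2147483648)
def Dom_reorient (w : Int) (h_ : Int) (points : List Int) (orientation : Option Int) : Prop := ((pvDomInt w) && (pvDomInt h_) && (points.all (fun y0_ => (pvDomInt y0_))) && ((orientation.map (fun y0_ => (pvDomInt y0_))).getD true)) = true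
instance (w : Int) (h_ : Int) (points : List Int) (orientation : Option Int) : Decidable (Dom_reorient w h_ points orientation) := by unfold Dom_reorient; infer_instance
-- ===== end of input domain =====

-- B drops A's corner-transform-plus-min/max recursion: it decodes the orientation into
-- (swap-axes, mirror-x, mirror-y) flags and maps each axis INTERVAL (normalized once by
-- an ordered-pair swap) directly, so no transformed-corner min/max is computed.

-- ===== PORT A =====
-- Literal port of A; where Python raises IndexError (pyGet? = none) the port returns []
-- (those inputs are excluded by Pre_reorient).
def reorient (w : Int) (h_ : Int) (points : List Int) (orientation : Option Int) : List Int :=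
  if orientation = none ∨ orientation = some 1 then points
  else if hlen : points.length = 4 then
    match PySem.List.pyGet? points 0, PySem.List.pyGet? points 1,
          PySem.List.pyGet? points 2, PySem.List.pyGet? points 3 with
    | some p0, some p1, some p2, some p3 =>
      match reorient w h_ [p0, p1] orientation, reorient w h_ [p2, p3] orientation with
      | [a, b], [c, d] => [min a c, min b d, max a c, max b d]
      | _, _ => []   -- unreachable: the recursive calls always return two elements
    | _, _, _, _ => []
  else if orientation = some 3 then
    match PySem.List.pyGet? points 0, PySem.List.pyGet? points 1 with
    | some p0, some p1 => [w - p0, h_ - p1]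
    | _, _ => []
  else if orientation = some 6 then
    match PySem.List.pyGet? points 0, PySem.List.pyGet? points 1 with
    | some p0, some p1 => [w - p1, p0]
    | _, _ => []
  else if orientation = some 8 then
    match PySem.List.pyGet? points 0, PySem.List.pyGet? points 1 with
    | some p0, some p1 => [p1, h_ - p0]
    | _, _ => []
  else points
termination_by points.length
decreasing_by all_goals simp [hlen]

-- ===== PORT B =====
-- port of Source B's _flags: membership tests become boolean disjunctions
def pvFlags (o : Int) : Bool × Bool × Bool :=
  ((o == 6 || o == 8), (o == 3 || o == 6), (o == 3 || o == 8))

def reorient_alt (w : Int) (h_ : Int) (points : List Int) (orientation : Option Int) : List Int :=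
  match orientation with
  | none => points
  | some o =>
    if o = 1 then points else
    let f := pvFlags o
    if points.length = 4 then
      -- points[0..3]: normalize each axis to an ordered interval, then map the intervals
      (((PySem.List.pyGet? points 0).bind fun p0 =>
        (PySem.List.pyGet? points 1).bind fun p1 =>
        (PySem.List.pyGet? points 2).bind fun p2 =>
        (PySem.List.pyGet? points 3).bind fun p3 =>
        let xi := if p0 ≤ p2 then (p0, p2) else (p2, p0)
        let yi := if p1 ≤ p3 then (p1, p3) else (p3, p1)
        let s := if f.1 then (yi, xi) else (xi, yi)
        let xi := if f.2.1 then (w - s.1.2, w - s.1.1) else s.1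
        let yi := if f.2.2 then (h_ - s.2.2, h_ - s.2.1) else s.2
        some [xi.1, yi.1, xi.2, yi.2]).getD [])
    else if f.1 || f.2.1 || f.2.2 then
      (((PySem.List.pyGet? points 0).bind fun x =>
        (PySem.List.pyGet? points 1).bind fun y =>
        let p := if f.1 then (y, x) else (x, y)
        let p := if f.2.1 then (w - p.1, p.2) else p
        let p := if f.2.2 then (p.1, h_ - p.2) else p
        some [p.1, p.2]).getD [])
    else points

-- ===== PRECONDITION & SPEC =====
-- Pre_ excludes exactly the inputs where A raises IndexError: orientation 3/6/8 with < 2 points.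
def Pre_reorient (w : Int) (h_ : Int) (points : List Int) (orientation : Option Int) : Prop :=
  (orientation = some 3 ∨ orientation = some 6 ∨ orientation = some 8) → 2 ≤ points.length
instance (w : Int) (h_ : Int) (points : List Int) (orientation : Option Int) : Decidable (Pre_reorient w h_ points orientation) := by unfold Pre_reorient; infer_instance

def pvWitness_reorient : Int × Int × List Int × Option Int := (10, 8, [1, 2, 5, 6], some 6)

def Spec_reorient (w : Int) (h_ : Int) (points : List Int) (orientation : Option Int) (out : List Int) : Prop := out = reorient_alt w h_ points orientation
instance (w : Int) (h_ : Int) (points : List Int) (orientation : Option Int) (out : List Int) : Decidable (Spec_reorient w h_ points orientation out) := by unfold Spec_reorient; infer_instance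

-- ===== CLAIM (what is proved, stated in full; the proofs are below) =====
def Claim_equal_reorient : Prop := ∀ (w : Int) (h_ : Int) (points : List Int) (orientation : Option Int), Dom_reorient w h_ points orientation → Pre_reorient w h_ points orientation → Spec_reorient w h_ points orientation (reorient w h_ points orientation)

-- ===== LEMMAS AND PROOFS =====

theorem reorient_pair (w h_ a b o : Int) (h1 : o ≠ 1) :
    reorient w h_ [a, b] (some o) =
      if o = 3 then [w - a, h_ - b]
      else if o = 6 then [w - b, a]
      else if o = 8 then [b, h_ - a]
      else [a, b] := by
  rw [reorient]
  simp [h1, PySem.List.pyGet?, PySem.List.pyIdx?]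

set_option maxHeartbeats 1600000 in
theorem reorient_eq_alt (w h_ : Int) (points : List Int) (orientation : Option Int)
    (hpre : Pre_reorient w h_ points orientation) :
    reorient w h_ points orientation = reorient_alt w h_ points orientation := by
  clear hpre  -- the ports agree even where Python raises (both return [] there)
  rcases orientation with _ | o
  · rw [reorient]; simp [reorient_alt]
  by_cases h1 : o = 1
  · rw [reorient]; simp [reorient_alt, h1]
  rcases points with _ | ⟨p0, _ | ⟨p1, _ | ⟨p2, _ | ⟨p3, _ | ⟨p4, rest⟩⟩⟩⟩⟩
  · by_cases h3 : o = 3 <;> by_cases h6 : o = 6 <;> by_cases h8 : o = 8 <;>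
      rw [reorient] <;>
      simp [reorient_alt, pvFlags, h1, h3, h6, h8, PySem.List.pyGet?, PySem.List.pyIdx?]
  · by_cases h3 : o = 3 <;> by_cases h6 : o = 6 <;> by_cases h8 : o = 8 <;>
      rw [reorient] <;>
      simp [reorient_alt, pvFlags, h1, h3, h6, h8, PySem.List.pyGet?, PySem.List.pyIdx?]
  · by_cases h3 : o = 3 <;> by_cases h6 : o = 6 <;> by_cases h8 : o = 8 <;>
      rw [reorient] <;>
      simp [reorient_alt, pvFlags, h1, h3, h6, h8, PySem.List.pyGet?, PySem.List.pyIdx?]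
  · by_cases h3 : o = 3 <;> by_cases h6 : o = 6 <;> by_cases h8 : o = 8 <;>
      rw [reorient] <;>
      simp [reorient_alt, pvFlags, h1, h3, h6, h8, PySem.List.pyGet?, PySem.List.pyIdx?]
  · -- length 4: unfold A once, evaluate the two recursive corner calls, compare branchwise
    rw [reorient]
    norm_num [PySem.List.pyGet?, PySem.List.pyIdx?, h1]
    norm_num [show ((2:Int).toNat) = 2 from rfl, show ((3:Int).toNat) = 3 from rfl]
    rw [reorient_pair w h_ p0 p1 o h1, reorient_pair w h_ p2 p3 o h1]
    by_cases h3 : o = 3 <;> by_cases h6 : o = 6 <;> by_cases h8 : o = 8 <;>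
      simp [reorient_alt, pvFlags, h1, h3, h6, h8, min_def, max_def] <;>
      split_ifs <;> simp_all <;> omega
  · by_cases h3 : o = 3 <;> by_cases h6 : o = 6 <;> by_cases h8 : o = 8 <;>
      rw [reorient] <;>
      simp [reorient_alt, pvFlags, h1, h3, h6, h8, PySem.List.pyGet?, PySem.List.pyIdx?] <;>
      split_ifs <;> simp_all

-- ===== VERDICT (by name: the statement is the Claim_ definition above) =====
theorem reorient_spec : Claim_equal_reorient := by
  intro w h_ points orientation _ hpre
  unfold Spec_reorient
  exact reorient_eq_alt w h_ points orientation hpre
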